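-- pv_equiv track=rewrite | github.com/DamianAmigo/Analyzes_protein | utils.py | agrupar_por_slice
-- ===== SOURCE A (Python) =====
-- def agrupar_por_slice(lista_archivos):
--     # Creamos un diccionario para agrupar los archivos por número final
--     archivos_por_numero = {}
--
--     for archivo in lista_archivos:
--         # Dividimos el nombre del archivo para extraer la parte relevante (el número)
--         partes = archivo.split()
--         if len(partes) > 1:
--             nombre_archivo = partes[-1]  # Esto asume que el número está al final después del último espacio
--             numero = nombre_archivo.split('.')[0]  # Eliminamos la extensión .tif para obtener el número
--             if numero not in archivos_por_numero:
--                 archivos_por_numero[numero] = []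
--             archivos_por_numero[numero].append(archivo)
--
--     # Filtramos y devolvemos solo los archivos con el mismo número final
--     archivos_filtrados = [archivos for archivos in archivos_por_numero.values() if len(archivos) > 1]
--
--     return archivos_filtrados
-- ===== SOURCE B (Python) =====
-- def _numero(archivo):
--     partes = archivo.split()
--     if len(partes) > 1:
--         return partes[-1].split('.')[0]
--     return None
--
--
-- def agrupar_por_slice(lista_archivos):
--     # pass 1: count how many files end in each number
--     conteo = {}
--     for archivo in lista_archivos:
--         n = _numero(archivo)
--         if n is not None:
--             conteo[n] = conteo.get(n, 0) + 1
--     # pass 2: regroup only the files whose number occurs more than once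
--     repetidos = {}
--     for archivo in lista_archivos:
--         n = _numero(archivo)
--         if n is not None and conteo[n] > 1:
--             if n not in repetidos:
--                 repetidos[n] = []
--             repetidos[n].append(archivo)
--     return list(repetidos.values())
-- ===== Notes on version B (the rewrite author's own statement) =====
-- stated objective: alternative
-- what changed: A builds one dict with the full group for every trailing number and then filters its values by length > 1; B first builds a plain count table of the parsed numbers and then, in a second pass, regroups only the files whose number occurs more than once, returning that dict's values unfiltered.
import Mathlib
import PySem

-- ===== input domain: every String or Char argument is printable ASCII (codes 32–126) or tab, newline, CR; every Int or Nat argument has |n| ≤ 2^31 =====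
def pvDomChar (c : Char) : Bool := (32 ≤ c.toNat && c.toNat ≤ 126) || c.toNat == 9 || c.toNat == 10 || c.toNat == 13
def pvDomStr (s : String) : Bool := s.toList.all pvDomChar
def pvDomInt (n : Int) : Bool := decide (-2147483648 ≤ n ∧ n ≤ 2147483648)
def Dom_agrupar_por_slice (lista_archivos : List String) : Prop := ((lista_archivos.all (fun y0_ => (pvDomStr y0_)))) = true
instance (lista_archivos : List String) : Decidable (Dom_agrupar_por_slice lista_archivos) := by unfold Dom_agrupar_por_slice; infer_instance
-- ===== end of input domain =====

-- B replaces A's build-all-groups-then-filter-values dict by a count pass plus a rebuild pass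
-- that only groups files whose trailing number occurs more than once (alternative decomposition).

-- ===== PORT A =====
-- Literal transliteration: one dict fold ('if numero not in d: d[numero] = []' then append),
-- then the list comprehension filtering values with len > 1.
def agrupar_por_slice (lista_archivos : List String) : List (List String) :=
  let archivos_por_numero :=
    lista_archivos.foldl (fun d archivo =>
      let partes := PySem.Str.split₀ archivo
      if 1 < partes.length then
        let nombre := PySem.List.pyGetD partes (-1) ""
        let numero := PySem.List.pyGetD ((PySem.Str.split? nombre ".").getD []) 0 ""
        let d := if d.contains numero then d else d.insert numero ([] : List String)
        d.insert numero (d.getD numero [] ++ [archivo])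
      else d) PySem.Dict.empty
  archivos_por_numero.values.filter (fun archivos => decide (1 < archivos.length))

-- ===== PORT B =====
-- helper `_numero` of Source B: the shared parsing, `none` where the guard fails
def pvNumero (archivo : String) : Option String :=
  let partes := PySem.Str.split₀ archivo
  if 1 < partes.length then
    some (PySem.List.pyGetD ((PySem.Str.split? (PySem.List.pyGetD partes (-1) "") ".").getD []) 0 "")
  else none

def agrupar_por_slice_alt (lista_archivos : List String) : List (List String) :=
  let conteo :=
    lista_archivos.foldl (fun d archivo =>
      match pvNumero archivo with
      | some n => d.insert n (d.getD n 0 + 1)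
      | none => d) (PySem.Dict.empty : PySem.Dict String Int)
  let repetidos :=
    lista_archivos.foldl (fun r archivo =>
      match pvNumero archivo with
      | some n =>
          if 1 < conteo.getD n 0 then
            let r := if r.contains n then r else r.insert n ([] : List String)
            r.insert n (r.getD n [] ++ [archivo])
          else r
      | none => r) (PySem.Dict.empty : PySem.Dict String (List String))
  repetidos.values

-- ===== PRECONDITION & SPEC =====
def Spec_agrupar_por_slice (lista_archivos : List String) (out : List (List String)) : Prop := out = agrupar_por_slice_alt lista_archivos
instance (lista_archivos : List String) (out : List (List String)) : Decidable (Spec_agrupar_por_slice lista_archivos out) := by unfold Spec_agrupar_por_slice; infer_instance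

-- ===== CLAIM (what is proved, stated in full; the proofs are below) =====
def Claim_equal_agrupar_por_slice : Prop := ∀ (lista_archivos : List String), Dom_agrupar_por_slice lista_archivos → Spec_agrupar_por_slice lista_archivos (agrupar_por_slice lista_archivos)

-- ===== LEMMAS AND PROOFS =====

-- the guard of the shared parsing as a Bool, and the parsed number
def pvPass (a : String) : Bool := 1 < (PySem.Str.split₀ a).length
def pvNum (a : String) : String :=
  PySem.List.pyGetD ((PySem.Str.split? (PySem.List.pyGetD (PySem.Str.split₀ a) (-1) "") ".").getD []) 0 ""

theorem pvNumero_eq (a : String) : pvNumero a = if pvPass a then some (pvNum a) else none := by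
  simp [pvNumero, pvPass, pvNum]

-- the parsed (numero, archivo) pairs, in file order
def pvPairs (l : List String) : List (String × String) := (l.filter pvPass).map (fun a => (pvNum a, a))
-- the parsed numbers, in file order
def pvKeys (l : List String) : List String := (l.filter pvPass).map pvNum
-- the group of a number inside a pair list
def pvG (ps : List (String × String)) (k : String) : List String :=
  (ps.filter (fun p => p.1 == k)).map (fun p => p.2)

theorem pvKeys_eq_map_fst (l : List String) : (pvPairs l).map (fun p => p.1) = pvKeys l := by
  simp [pvPairs, pvKeys]

-- setdefault-then-append is Dict.modify
theorem pvStep_eq_modify (d : PySem.Dict String (List String)) (k x : String) :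
    (if d.contains k then d else d.insert k ([] : List String)).insert k
      ((if d.contains k then d else d.insert k ([] : List String)).getD k [] ++ [x])
    = d.modify k [] (· ++ [x]) := by
  by_cases h : d.contains k = true
  · simp [h, PySem.Dict.modify]
  · simp only [Bool.not_eq_true] at h
    simp [h, PySem.Dict.modify, PySem.Dict.insert_insert_self,
      PySem.Dict.getD_insert_self, PySem.Dict.getD_of_not_contains d ([] : List String) h]

-- a loop that matches on pvNumero is a fold over the parsed pairs
theorem pvFold_pairs {σ : Type} (g : σ → String → String → σ) (l : List String) (d : σ) :
    l.foldl (fun d a =>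
      match pvNumero a with
      | some n => g d n a
      | none => d) d
    = (pvPairs l).foldl (fun d p => g d p.1 p.2) d := by
  induction l generalizing d with
  | nil => rfl
  | cons a l ih =>
    rw [List.foldl_cons, ih]
    by_cases hp : pvPass a = true
    · have h1 : (match pvNumero a with | some n => g d n a | none => d) = g d (pvNum a) a := by
        rw [pvNumero_eq, if_pos hp]
      have h2 : pvPairs (a :: l) = (pvNum a, a) :: pvPairs l := by
        simp [pvPairs, hp]
      rw [h1, h2, List.foldl_cons]
    · simp only [Bool.not_eq_true] at hp
      have h1 : (match pvNumero a with | some n => g d n a | none => d) = d := by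
        simp [pvNumero_eq, hp]
      have h2 : pvPairs (a :: l) = pvPairs l := by
        simp [pvPairs, hp]
      rw [h1, h2]

-- A's dict fold over the raw list is the modify fold over the parsed pairs
theorem pvFoldA (l : List String) (d : PySem.Dict String (List String)) :
    l.foldl (fun d archivo =>
      let partes := PySem.Str.split₀ archivo
      if 1 < partes.length then
        let nombre := PySem.List.pyGetD partes (-1) ""
        let numero := PySem.List.pyGetD ((PySem.Str.split? nombre ".").getD []) 0 ""
        let d := if d.contains numero then d else d.insert numero ([] : List String)
        d.insert numero (d.getD numero [] ++ [archivo])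
      else d) d
    = (pvPairs l).foldl (fun d p => d.modify p.1 [] (· ++ [p.2])) d := by
  induction l generalizing d with
  | nil => rfl
  | cons a l ih =>
    rw [List.foldl_cons, ih]
    by_cases h : 1 < (PySem.Str.split₀ a).length
    · have hp : pvPass a = true := by simpa [pvPass] using h
      have h2 : pvPairs (a :: l) = (pvNum a, a) :: pvPairs l := by
        simp [pvPairs, hp]
      rw [h2, List.foldl_cons]
      congr 1
      rw [if_pos h, pvStep_eq_modify]
      simp [pvNum]
    · have hp : pvPass a = false := by simp [pvPass, h]
      have h2 : pvPairs (a :: l) = pvPairs l := by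
        simp [pvPairs, hp]
      rw [h2]
      congr 1
      rw [if_neg h]

-- the values of a modify-append fold from empty, as the groups over the pair list
theorem pvValues_modify_fold (ps : List (String × String)) :
    (ps.foldl (fun d p => d.modify p.1 [] (· ++ [p.2]))
        (PySem.Dict.empty : PySem.Dict String (List String))).values
    = (PySem.Set.ofList (ps.map (fun p => p.1))).map (pvG ps) := by
  have hnd : (ps.foldl (fun d p => d.modify p.1 [] (· ++ [p.2]))
      (PySem.Dict.empty : PySem.Dict String (List String))).keys.Nodup := by
    apply PySem.Dict.nodup_keys_foldl_modify_key ps (fun p => p.1) [] (fun _ p v => v ++ [p.2])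
    simp [PySem.Dict.keys_empty]
  rw [PySem.Dict.values_eq_map_keys _ hnd ([] : List String),
    PySem.Dict.keys_foldl_modify_key ps (fun p => p.1) [] (fun _ p v => v ++ [p.2])]
  have hkeys : PySem.Set.update (PySem.Dict.empty : PySem.Dict String (List String)).keys
      (ps.map (fun p => p.1)) = PySem.Set.ofList (ps.map (fun p => p.1)) := rfl
  rw [hkeys]
  apply List.map_congr_left
  intro k _
  rw [PySem.Dict.getD_foldl_modify_append]
  simp [PySem.Dict.getD_empty, pvG]

-- first-occurrence dedup commutes with filter
theorem pvUpdate_filter {α : Type} [BEq α] [LawfulBEq α] (p : α → Bool) (l s : List α) :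
    (l.filter p).foldl PySem.Set.add (s.filter p) = (l.foldl PySem.Set.add s).filter p := by
  induction l generalizing s with
  | nil => rfl
  | cons x l ih =>
    by_cases h : p x = true
    · rw [List.filter_cons_of_pos h, List.foldl_cons, List.foldl_cons]
      have hadd : PySem.Set.add (s.filter p) x = (PySem.Set.add s x).filter p := by
        by_cases hm : x ∈ s
        · simp [PySem.Set.add, PySem.Set.contains, List.contains_eq_mem, hm, h]
        · simp [PySem.Set.add, PySem.Set.contains, List.contains_eq_mem, hm, h,
            List.filter_append]
      rw [hadd]; exact ih _
    · simp only [Bool.not_eq_true] at h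
      rw [List.filter_cons_of_neg (by simp [h]), List.foldl_cons]
      have hadd : (PySem.Set.add s x).filter p = s.filter p := by
        by_cases hm : x ∈ s
        · simp [PySem.Set.add, PySem.Set.contains, List.contains_eq_mem, hm]
        · simp [PySem.Set.add, PySem.Set.contains, List.contains_eq_mem, hm,
            List.filter_append, h]
      rw [← hadd]; exact ih _

theorem pvOfList_filter {α : Type} [BEq α] [LawfulBEq α] (p : α → Bool) (l : List α) :
    PySem.Set.ofList (l.filter p) = (PySem.Set.ofList l).filter p := by
  rw [PySem.Set.ofList_eq_foldl, PySem.Set.ofList_eq_foldl]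
  exact pvUpdate_filter p l []

-- the length of a number's group is its count among the parsed numbers
theorem pvG_length (l : List String) (k : String) :
    (pvG (pvPairs l) k).length = (pvKeys l).count k := by
  rw [pvG, List.length_map, ← List.countP_eq_length_filter, ← pvKeys_eq_map_fst,
    List.count_eq_countP, List.countP_map]
  rfl

-- ===== VERDICT (by name: the statement is the Claim_ definition above) =====
theorem agrupar_por_slice_spec : Claim_equal_agrupar_por_slice := by
  intro l _
  show agrupar_por_slice l = agrupar_por_slice_alt l
  -- A's side: groups over the parsed pairs, then the length > 1 filter
  rw [agrupar_por_slice, pvFoldA, pvValues_modify_fold]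
  -- B's side: the counting loop, then the rebuild loop, as folds over the parsed pairs
  rw [agrupar_por_slice_alt,
    pvFold_pairs (fun (d : PySem.Dict String Int) n _ => d.insert n (d.getD n 0 + 1)) l
      PySem.Dict.empty]
  rw [show ((pvPairs l).foldl (fun (d : PySem.Dict String Int) p => d.insert p.1 (d.getD p.1 0 + 1))
        PySem.Dict.empty)
      = ((pvKeys l).foldl (fun (d : PySem.Dict String Int) n => d.insert n (d.getD n 0 + 1))
        PySem.Dict.empty)
    from by rw [← pvKeys_eq_map_fst, List.foldl_map]]
  set conteo := (pvKeys l).foldl (fun (d : PySem.Dict String Int) n => d.insert n (d.getD n 0 + 1))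
    PySem.Dict.empty with hconteo
  rw [pvFold_pairs (fun (r : PySem.Dict String (List String)) n archivo =>
      if 1 < conteo.getD n 0 then
        (if r.contains n then r else r.insert n ([] : List String)).insert n
          ((if r.contains n then r else r.insert n ([] : List String)).getD n [] ++ [archivo])
      else r) l PySem.Dict.empty]
  -- the rebuild step is a conditional modify
  rw [show (fun (r : PySem.Dict String (List String)) (p : String × String) =>
        if 1 < conteo.getD p.1 0 then
          (if r.contains p.1 then r else r.insert p.1 ([] : List String)).insert p.1
            ((if r.contains p.1 then r else r.insert p.1 ([] : List String)).getD p.1 [] ++ [p.2])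
        else r)
      = (fun r p => if 1 < conteo.getD p.1 0 then r.modify p.1 [] (· ++ [p.2]) else r)
    from by funext r p; by_cases hc : 1 < conteo.getD p.1 0 <;> simp [hc, pvStep_eq_modify]]
  rw [show (List.foldl (fun (r : PySem.Dict String (List String)) (p : String × String) =>
        if 1 < conteo.getD p.1 0 then r.modify p.1 [] (· ++ [p.2]) else r)
        PySem.Dict.empty (pvPairs l))
      = List.foldl (fun r p => r.modify p.1 [] (· ++ [p.2])) PySem.Dict.empty
        ((pvPairs l).filter (fun p => decide (1 < conteo.getD p.1 0)))
    from PySem.List.foldl_ite_eq_foldl_filter _ _ _ _]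
  -- the count the rebuild loop consults is the multiplicity among the parsed numbers
  rw [List.filter_congr (p := fun (p : String × String) => decide (1 < conteo.getD p.1 0))
      (q := fun (p : String × String) => decide (1 < ((pvKeys l).count p.1 : Int)))
      (l := pvPairs l)
    (fun p _ => by simp [hconteo, PySem.Dict.getD_foldl_insert_add_one, PySem.Dict.getD_empty])]
  rw [pvValues_modify_fold]
  -- pure list algebra: filter-after-map on both sides, dedup commutes with filter
  rw [show (List.map (fun p : String × String => p.1)
        (List.filter (fun p => decide (1 < ((pvKeys l).count p.1 : Int))) (pvPairs l)))
      = List.filter (fun n => decide (1 < ((pvKeys l).count n : Int)))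
        (List.map (fun p : String × String => p.1) (pvPairs l))
    from (List.filter_map (f := fun p : String × String => p.1)
      (p := fun n => decide (1 < ((pvKeys l).count n : Int))) (l := pvPairs l)).symm]
  rw [pvKeys_eq_map_fst, pvOfList_filter,
    List.filter_map (f := pvG (pvPairs l))
      (p := fun archivos => decide (1 < archivos.length)) (l := PySem.Set.ofList (pvKeys l))]
  rw [List.filter_congr
      (p := (fun archivos => decide (1 < archivos.length)) ∘ pvG (pvPairs l))
      (q := fun (k : String) => decide (1 < ((pvKeys l).count k : Int)))
      (l := PySem.Set.ofList (pvKeys l))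
    (fun k _ => by
      simp only [Function.comp_apply]
      rw [decide_eq_decide, pvG_length]
      omega)]
  apply List.map_congr_left
  intro k hk
  have hbig : decide (1 < ((pvKeys l).count k : Int)) = true := (List.mem_filter.mp hk).2
  rw [pvG, pvG, List.filter_filter]
  rw [List.filter_congr
      (p := fun (a : String × String) =>
        (a.1 == k) && decide (1 < ((pvKeys l).count a.1 : Int)))
      (q := fun (a : String × String) => a.1 == k) (l := pvPairs l)
    (fun p _ => by
      by_cases he : (p.1 == k) = true
      · have hpk : p.1 = k := by simpa using he
        have hc := of_decide_eq_true hbig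
        simp [hpk]
        omega
      · simp [he])]
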